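-- pv_equiv track=rewrite | github.com/biosoftlab/pico | VNN/VNN_utils.py | convert_matrix
-- ===== SOURCE A (Python) =====
-- def convert_matrix(row, column, input_list):  # result: (row: previous layer, column: next layer), matrix name = 'row_column'
--     result = list()
--
--     for i in range(len(row)):
--
--         new_row = [0]*len(column)
--
--         relations = (j for j in range(len(column)) if [column[j], row[i]] in input_list)
--         for relation in relations:
--             new_row[relation] = 1
--
--         result.append(new_row)
--
--     return result
-- ===== SOURCE B (Python) =====
-- def convert_matrix(row, column, input_list):  # scatter: allocate zeros, one pass over input_list writing 1s via index maps
--     rix = {}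
--     for i, r in enumerate(row):
--         rix.setdefault(r, []).append(i)
--     cix = {}
--     for j, c in enumerate(column):
--         cix.setdefault(c, []).append(j)
--     result = [[0] * len(column) for _ in range(len(row))]
--     for e in input_list:
--         if len(e) == 2:
--             c, r = e
--             for i in rix.get(r, ()):
--                 for j in cix.get(c, ()):
--                     result[i][j] = 1
--     return result
-- ===== Notes on version B (the rewrite author's own statement) =====
-- stated objective: faster
-- what changed: A tests membership of [column[j], row[i]] in input_list for every cell; B inverts the computation: it allocates a zero matrix, builds value-to-index maps for row and column, and makes one pass over input_list scattering 1s directly into the affected cells, never testing a cell.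
import Mathlib
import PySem

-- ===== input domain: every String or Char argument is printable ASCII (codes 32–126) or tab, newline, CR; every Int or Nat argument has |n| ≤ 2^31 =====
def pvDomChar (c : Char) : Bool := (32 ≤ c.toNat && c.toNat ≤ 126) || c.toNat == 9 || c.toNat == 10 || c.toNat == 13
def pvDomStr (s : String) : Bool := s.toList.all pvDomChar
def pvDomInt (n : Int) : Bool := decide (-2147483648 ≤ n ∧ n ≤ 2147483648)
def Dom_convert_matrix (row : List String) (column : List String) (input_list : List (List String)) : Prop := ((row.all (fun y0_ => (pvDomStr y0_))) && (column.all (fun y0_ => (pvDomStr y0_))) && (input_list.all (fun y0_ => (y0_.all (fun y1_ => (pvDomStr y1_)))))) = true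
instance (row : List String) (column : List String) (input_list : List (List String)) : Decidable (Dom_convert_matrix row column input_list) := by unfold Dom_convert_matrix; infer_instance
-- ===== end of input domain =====

-- B inverts A's per-cell membership scan: it allocates a zero matrix, builds value→index maps for
-- row and column, and makes a single pass over input_list scattering 1s into the affected cells.

-- ===== PORT A =====
-- indices i, j always lie in range, so List.getD is exact for row[i] / column[j]
def convert_matrix (row : List String) (column : List String) (input_list : List (List String)) : List (List Int) :=
  (List.range row.length).foldl
    (fun result i =>
      let new_row := List.replicate column.length (0 : Int)
      let relations := (List.range column.length).filter
        (fun j => input_list.contains [column.getD j "", row.getD i ""])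
      let new_row := relations.foldl (fun nr j => nr.set j 1) new_row
      result ++ [new_row]) []

-- ===== PORT B =====
-- 'for i, r in enumerate(row): rix.setdefault(r, []).append(i)' — zipIdx is Python's enumerate (indices are Nat, exact: Python's are nonnegative)
def buildIdx (l : List String) : PySem.Dict String (List Nat) :=
  l.zipIdx.foldl (fun m p => m.modify p.1 [] (fun ix => ix ++ [p.2])) PySem.Dict.empty

-- 'result[i][j] = 1'
def setCell (res : List (List Int)) (i j : Nat) : List (List Int) :=
  res.modify i (fun r => r.set j 1)

def convert_matrix_alt (row : List String) (column : List String) (input_list : List (List String)) : List (List Int) :=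
  let rix := buildIdx row
  let cix := buildIdx column
  let init := List.replicate row.length (List.replicate column.length (0 : Int))
  input_list.foldl
    (fun res e =>
      match e with
      | [c, r] =>
        (rix.getD r []).foldl (fun res i =>
          (cix.getD c []).foldl (fun res j => setCell res i j) res) res
      | _ => res) init

-- ===== PRECONDITION & SPEC =====
def Spec_convert_matrix (row : List String) (column : List String) (input_list : List (List String)) (out : List (List Int)) : Prop := out = convert_matrix_alt row column input_list
instance (row : List String) (column : List String) (input_list : List (List String)) (out : List (List Int)) : Decidable (Spec_convert_matrix row column input_list out) := by unfold Spec_convert_matrix; infer_instance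

-- ===== CLAIM (what is proved, stated in full; the proofs are below) =====
def Claim_equal_convert_matrix : Prop := ∀ (row : List String) (column : List String) (input_list : List (List String)), Dom_convert_matrix row column input_list → Spec_convert_matrix row column input_list (convert_matrix row column input_list)

-- ===== LEMMAS AND PROOFS =====

-- total cell accessor used by the proofs
def getCell (res : List (List Int)) (i j : Nat) : Int := ((res[i]?.getD [])[j]?.getD 0)

-- does input element e hit cell (i', j')?
def hitB (rix cix : PySem.Dict String (List Nat)) (i' j' : Nat) (e : List String) : Bool :=
  match e with
  | [c, r] => (rix.getD r []).contains i' && (cix.getD c []).contains j'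
  | _ => false

lemma length_setCell (res : List (List Int)) (i j : Nat) :
    (setCell res i j).length = res.length := by
  simp [setCell]

lemma rowlen_setCell (res : List (List Int)) (i j k : Nat) :
    ((setCell res i j)[k]?.getD []).length = (res[k]?.getD []).length := by
  simp only [setCell, List.getElem?_modify]
  cases h : res[k]? with
  | none => simp
  | some r => by_cases hik : i = k <;> simp [hik]

lemma getCell_setCell (res : List (List Int)) (i j i' j' : Nat)
    (hj : j < (res[i]?.getD []).length) :
    getCell (setCell res i j) i' j' = if i = i' ∧ j = j' then 1 else getCell res i' j' := by
  simp only [getCell, setCell, List.getElem?_modify]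
  by_cases hii : i = i'
  · subst hii
    cases h : res[i]? with
    | none => simp [h] at hj
    | some r =>
      rw [h] at hj
      simp only [Option.getD_some] at hj
      simp only [h, Option.map_eq_map, Option.map_some, Option.getD_some]
      by_cases hjj : j = j'
      · subst hjj; simp [List.getElem?_set, hj]
      · simp [List.getElem?_set, hjj]
  · simp [hii]

lemma rowlen_foldl_inner (jl : List Nat) (res : List (List Int)) (i k : Nat) :
    ((jl.foldl (fun a j => setCell a i j) res)[k]?.getD []).length = ((res)[k]?.getD []).length := by
  induction jl generalizing res with
  | nil => rfl
  | cons j t ih => rw [List.foldl_cons, ih, rowlen_setCell]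

lemma length_foldl_inner (jl : List Nat) (res : List (List Int)) (i : Nat) :
    (jl.foldl (fun a j => setCell a i j) res).length = res.length := by
  induction jl generalizing res with
  | nil => rfl
  | cons j t ih => rw [List.foldl_cons, ih, length_setCell]

lemma getCell_foldl_inner (jl : List Nat) (res : List (List Int)) (i i' j' : Nat)
    (hjl : ∀ j ∈ jl, j < (res[i]?.getD []).length) :
    getCell (jl.foldl (fun a j => setCell a i j) res) i' j'
      = if i = i' ∧ j' ∈ jl then 1 else getCell res i' j' := by
  induction jl generalizing res with
  | nil => simp
  | cons j t ih =>
    rw [List.foldl_cons, ih _ (fun x hx => by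
      rw [rowlen_setCell]; exact hjl x (List.mem_cons_of_mem _ hx)),
      getCell_setCell _ _ _ _ _ (hjl j (List.mem_cons_self))]
    by_cases hii : i = i'
    · by_cases hjt : j' ∈ t
      · simp [hii, hjt, List.mem_cons]
      · by_cases hjj : j = j'
        · subst hjj; simp [hii, hjt, List.mem_cons]
        · have hjj' : j' ≠ j := fun h => hjj h.symm
          simp [hii, hjt, hjj, hjj', List.mem_cons]
    · simp [hii]

lemma rowlen_foldl_mid (il : List Nat) (jl : List Nat) (res : List (List Int)) (k : Nat) :
    ((il.foldl (fun a i => jl.foldl (fun a j => setCell a i j) a) res)[k]?.getD []).length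
      = ((res)[k]?.getD []).length := by
  induction il generalizing res with
  | nil => rfl
  | cons i t ih => rw [List.foldl_cons, ih, rowlen_foldl_inner]

lemma length_foldl_mid (il : List Nat) (jl : List Nat) (res : List (List Int)) :
    (il.foldl (fun a i => jl.foldl (fun a j => setCell a i j) a) res).length = res.length := by
  induction il generalizing res with
  | nil => rfl
  | cons i t ih => rw [List.foldl_cons, ih, length_foldl_inner]

lemma getCell_foldl_mid (il jl : List Nat) (res : List (List Int)) (i' j' : Nat)
    (hjl : ∀ i ∈ il, ∀ j ∈ jl, j < (res[i]?.getD []).length) :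
    getCell (il.foldl (fun a i => jl.foldl (fun a j => setCell a i j) a) res) i' j'
      = if i' ∈ il ∧ j' ∈ jl then 1 else getCell res i' j' := by
  induction il generalizing res with
  | nil => simp
  | cons i t ih =>
    rw [List.foldl_cons, ih _ (fun x hx j hj => by
      rw [rowlen_foldl_inner]; exact hjl x (List.mem_cons_of_mem _ hx) j hj),
      getCell_foldl_inner _ _ _ _ _ (hjl i List.mem_cons_self)]
    by_cases hjl' : j' ∈ jl
    · by_cases hit : i' ∈ t
      · simp [hjl', hit, List.mem_cons]
      · by_cases hii : i = i'
        · subst hii; simp [hjl', hit, List.mem_cons]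
        · have hii' : i' ≠ i := fun h => hii h.symm
          simp [hjl', hit, hii, hii', List.mem_cons]
    · simp [hjl']

-- membership in the dict built by the setdefault/append fold
lemma mem_idxfold (ps : List (String × Nat)) (d : PySem.Dict String (List Nat)) (v : String) (i : Nat) :
    i ∈ (ps.foldl (fun m p => m.modify p.1 [] (fun ix => ix ++ [p.2])) d).getD v []
      ↔ (∃ p ∈ ps, p.1 = v ∧ p.2 = i) ∨ i ∈ d.getD v [] := by
  induction ps generalizing d with
  | nil => simp
  | cons p t ih =>
    rw [List.foldl_cons, ih, PySem.Dict.getD_modify]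
    rw [List.exists_mem_cons_iff]
    by_cases hv : v = p.1
    · subst hv
      rw [if_pos rfl]
      simp only [List.mem_append, List.mem_singleton, eq_comm (a := i)]
      generalize (∃ p_1 ∈ t, p_1.1 = p.1 ∧ p_1.2 = i) = E
      tauto
    · rw [if_neg hv]
      have : ¬ (p.1 = v ∧ p.2 = i) := fun h => hv h.1.symm
      generalize (∃ p ∈ t, p.1 = v ∧ p.2 = i) = E
      tauto

lemma mem_buildIdx (l : List String) (v : String) (i : Nat) :
    i ∈ (buildIdx l).getD v [] ↔ l[i]? = some v := by
  unfold buildIdx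
  rw [mem_idxfold]
  simp only [PySem.Dict.getD_empty, List.not_mem_nil, or_false]
  constructor
  · rintro ⟨⟨x, k⟩, hp, hx, hk⟩
    rw [List.mk_mem_zipIdx_iff_getElem?] at hp
    subst hk; rw [← hx]; exact hp
  · intro h
    exact ⟨(v, i), List.mk_mem_zipIdx_iff_getElem?.mpr h, rfl, rfl⟩

-- the scatter fold over input_list preserves the matrix shape
lemma rowlen_scatter (il : List (List String)) (rix cix : PySem.Dict String (List Nat))
    (res : List (List Int)) (k : Nat) :
    ((il.foldl (fun res e =>
        match e with
        | [c, r] =>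
          (rix.getD r []).foldl (fun res i =>
            (cix.getD c []).foldl (fun res j => setCell res i j) res) res
        | _ => res) res)[k]?.getD []).length = ((res)[k]?.getD []).length := by
  induction il generalizing res with
  | nil => rfl
  | cons e t ih =>
    rw [List.foldl_cons]
    match e with
    | [] => rw [ih]
    | [x] => rw [ih]
    | [c, r] => rw [ih, rowlen_foldl_mid]
    | x :: y :: z :: w => rw [ih]

lemma length_scatter (il : List (List String)) (rix cix : PySem.Dict String (List Nat))
    (res : List (List Int)) :
    (il.foldl (fun res e =>
        match e with
        | [c, r] =>
          (rix.getD r []).foldl (fun res i =>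
            (cix.getD c []).foldl (fun res j => setCell res i j) res) res
        | _ => res) res).length = res.length := by
  induction il generalizing res with
  | nil => rfl
  | cons e t ih =>
    rw [List.foldl_cons]
    match e with
    | [] => rw [ih]
    | [x] => rw [ih]
    | [c, r] => rw [ih, length_foldl_mid]
    | x :: y :: z :: w => rw [ih]

-- the scatter fold over input_list, cellwise
lemma getCell_scatter (il : List (List String))
    (rix cix : PySem.Dict String (List Nat)) (res : List (List Int)) (i' j' : Nat)
    (hb : ∀ (c r : String), ∀ i ∈ rix.getD r [], ∀ j ∈ cix.getD c [], j < ((res)[i]?.getD []).length) :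
    getCell (il.foldl
      (fun res e =>
        match e with
        | [c, r] =>
          (rix.getD r []).foldl (fun res i =>
            (cix.getD c []).foldl (fun res j => setCell res i j) res) res
        | _ => res) res) i' j'
      = if il.any (hitB rix cix i' j') then 1 else getCell res i' j' := by
  induction il generalizing res with
  | nil => simp
  | cons e t ih =>
    rw [List.foldl_cons, List.any_cons]
    match e with
    | [] => rw [ih _ hb]; simp [hitB]
    | [x] => rw [ih _ hb]; simp [hitB]
    | [c, r] =>
      rw [ih _ (fun c' r' i hi j hj => by rw [rowlen_foldl_mid]; exact hb c' r' i hi j hj),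
        getCell_foldl_mid _ _ _ _ _ (fun i hi j hj => hb c r i hi j hj)]
      simp only [hitB, Bool.and_eq_true, List.contains_iff_mem]
      by_cases ht : t.any (hitB rix cix i' j') <;>
        by_cases hi : i' ∈ rix.getD r [] <;> by_cases hj : j' ∈ cix.getD c [] <;>
          simp [ht, hi, hj]
    | x :: y :: z :: w => rw [ih _ hb]; simp [hitB]

lemma getCell_replicate (R C : Nat) (i j : Nat) :
    getCell (List.replicate R (List.replicate C (0 : Int))) i j = 0 := by
  simp only [getCell, List.getElem?_replicate]
  by_cases h : i < R <;> by_cases h' : j < C <;> simp [h, h', List.getElem?_replicate]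

-- for in-range (i, j), e hits cell (i, j) exactly when e is the pair A looks up
lemma hitB_buildIdx (row column : List String) (i j : Nat) (e : List String)
    (hi : i < row.length) (hj : j < column.length) :
    hitB (buildIdx row) (buildIdx column) i j e = (e == [column[j], row[i]]) := by
  match e with
  | [] => rw [Bool.eq_iff_iff]; simp [hitB]
  | [x] => rw [Bool.eq_iff_iff]; simp [hitB]
  | [c, r] =>
    rw [Bool.eq_iff_iff]
    simp only [hitB, Bool.and_eq_true, List.contains_iff_mem, mem_buildIdx,
      List.getElem?_eq_getElem hi, List.getElem?_eq_getElem hj, Option.some_inj, beq_iff_eq]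
    constructor
    · rintro ⟨hr, hc⟩; rw [hr, hc]
    · intro h; injection h with h1 h2; injection h2 with h2 _; exact ⟨h2.symm, h1.symm⟩
  | x :: y :: z :: w => rw [Bool.eq_iff_iff]; simp [hitB]

lemma a_row_eq_aux_len (l : List Nat) (nr : List Int) :
    (l.foldl (fun a j => a.set j 1) nr).length = nr.length := by
  induction l generalizing nr with
  | nil => rfl
  | cons j t ih => simp [ih]

lemma getD_setfold (l : List Nat) (nr : List Int) (k : Nat) (hk : k < nr.length) :
    (l.foldl (fun a j => a.set j 1) nr).getD k 0 = if k ∈ l then 1 else nr.getD k 0 := by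
  induction l generalizing nr with
  | nil => simp
  | cons j t ih =>
    rw [List.foldl_cons, ih _ (by simpa using hk)]
    by_cases hkj : k = j
    · subst hkj
      simp [List.getD_eq_getElem?_getD, hk]
    · simp [hkj, List.getD_eq_getElem?_getD, List.getElem?_set_ne (by omega : j ≠ k)]

-- A's i-th row computed positionally equals the if-map form
lemma a_row_eq (p : Nat → Bool) (m : Nat) :
    (((List.range m).filter p).foldl (fun nr j => nr.set j 1) (List.replicate m (0 : Int)))
      = (List.range m).map (fun j => if p j then 1 else 0) := by
  apply List.ext_getElem
  · simp [a_row_eq_aux_len]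
  · intro k h1 h2
    have hk : k < m := by simpa [a_row_eq_aux_len] using h1
    have := getD_setfold ((List.range m).filter p) (List.replicate m (0 : Int)) k (by simpa using hk)
    rw [List.getD_eq_getElem (hn := h1)] at this
    rw [this]
    simp [List.mem_filter, hk]

-- the lets in convert_matrix_alt, unfolded (definitional)
lemma alt_eq (row column : List String) (il : List (List String)) :
    convert_matrix_alt row column il
      = il.foldl
          (fun res e =>
            match e with
            | [c, r] =>
              ((buildIdx row).getD r []).foldl (fun res i =>
                ((buildIdx column).getD c []).foldl (fun res j => setCell res i j) res) res
            | _ => res)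
          (List.replicate row.length (List.replicate column.length (0 : Int))) := rfl

-- B, characterised cellwise
lemma alt_eq_map (row column : List String) (il : List (List String)) :
    convert_matrix_alt row column il
      = (List.range row.length).map (fun i => (List.range column.length).map
          (fun j => if il.contains [column.getD j "", row.getD i ""] then (1 : Int) else 0)) := by
  rw [alt_eq]
  have hb : ∀ (c r : String), ∀ i ∈ (buildIdx row).getD r [], ∀ j ∈ (buildIdx column).getD c [],
      j < (((List.replicate row.length (List.replicate column.length (0 : Int)))[i]?.getD []).length) := by
    intro c r i hi j hj
    have hilt : i < row.length := (List.getElem?_eq_some_iff.mp ((mem_buildIdx row r i).mp hi)).1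
    have hjlt : j < column.length := (List.getElem?_eq_some_iff.mp ((mem_buildIdx column c j).mp hj)).1
    rw [List.getElem?_replicate, if_pos hilt]
    simpa using hjlt
  apply List.ext_getElem
  · rw [length_scatter]; simp
  · intro i h1 h2
    have hi : i < row.length := by rw [length_scatter] at h1; simpa using h1
    simp only [List.getElem_map, List.getElem_range]
    apply List.ext_getElem
    · have hrl := rowlen_scatter il (buildIdx row) (buildIdx column)
        (List.replicate row.length (List.replicate column.length (0 : Int))) i
      rw [List.getElem?_eq_getElem h1, Option.getD_some] at hrl
      rw [hrl, List.getElem?_replicate, if_pos hi]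
      simp
    · intro j g1 g2
      have hj : j < column.length := by simpa using g2
      have hcell := getCell_scatter il (buildIdx row) (buildIdx column)
        (List.replicate row.length (List.replicate column.length (0 : Int))) i j hb
      have hget : getCell (il.foldl
          (fun res e =>
            match e with
            | [c, r] =>
              ((buildIdx row).getD r []).foldl (fun res i =>
                ((buildIdx column).getD c []).foldl (fun res j => setCell res i j) res) res
            | _ => res)
          (List.replicate row.length (List.replicate column.length (0 : Int)))) i j
          = (il.foldl
          (fun res e =>
            match e with
            | [c, r] =>
              ((buildIdx row).getD r []).foldl (fun res i =>
                ((buildIdx column).getD c []).foldl (fun res j => setCell res i j) res) res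
            | _ => res)
          (List.replicate row.length (List.replicate column.length (0 : Int))))[i][j] := by
        simp [getCell, List.getElem?_eq_getElem h1, List.getElem?_eq_getElem g1]
      rw [← hget, hcell, getCell_replicate]
      have hany : il.any (hitB (buildIdx row) (buildIdx column) i j)
          = il.contains [column[j], row[i]] := by
        rw [Bool.eq_iff_iff]
        simp only [List.any_eq_true, List.contains_iff_mem]
        constructor
        · rintro ⟨e, he, hh⟩
          rw [hitB_buildIdx row column i j e hi hj, beq_iff_eq] at hh
          rw [← hh]; exact he
        · intro h
          exact ⟨_, h, by rw [hitB_buildIdx row column i j _ hi hj]; exact beq_self_eq_true _⟩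
      rw [hany, List.getElem_map, List.getElem_range,
        List.getD_eq_getElem column "" hj, List.getD_eq_getElem row "" hi]

-- ===== VERDICT (by name: the statement is the Claim_ definition above) =====
theorem convert_matrix_spec : Claim_equal_convert_matrix := by
  intro row column input_list _
  unfold Spec_convert_matrix convert_matrix
  rw [PySem.List.foldl_append_singleton_eq_map, alt_eq_map, List.nil_append]
  refine List.map_congr_left fun i _ => ?_
  exact a_row_eq _ _
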